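-- pv_equiv track=rewrite | github.com/RudolphRiedel/Saleae_Logic_HLA | EmbeddedVideoEngine/EmbeddedVideoEngine.py | decode_read_response
-- ===== SOURCE A (Python) =====
-- def decode_read_response(miso_buffer):
--     """
--     Extracts up to 4 bytes of little-endian return data from MISO after the 3-byte header and dummy byte.
--     Returns formatted hex string or None.
--     """
--     miso_bytes = [b for _, _, b in miso_buffer]
--
--     if len(miso_bytes) <= 4:
--         return None  # Not enough bytes (need 3 header + 1 dummy + at least 1 data)
--
--     data_bytes = miso_bytes[4:]  # Skip 3-byte addr + dummy
--     if not data_bytes: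
--         return None
--
--     if len(data_bytes) > 4:
--         data_bytes = data_bytes[:4]  # Only take max 4
--
--     value = int.from_bytes(data_bytes, byteorder='little')
--     return f"0x{value:0{len(data_bytes) * 2}X}"
-- ===== SOURCE B (Python) =====
-- def decode_read_response(miso_buffer):
--     miso_bytes = [b for _, _, b in miso_buffer]
--     if len(miso_bytes) <= 4:
--         return None
--     data_bytes = miso_bytes[4:8]
--     return '0x' + ''.join(f'{b:02X}' for b in reversed(data_bytes))
-- ===== Notes on version B (the rewrite author's own statement) =====
-- stated objective: idiomatic
-- what changed: B builds the hex string directly by joining a two-digit uppercase hex for each data byte in reversed (big-endian display) order, instead of assembling an integer with int.from_bytes and formatting it with a width-parameterised format spec; the [4:8] slice replaces drop/nonempty-check/truncate.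
import Mathlib
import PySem

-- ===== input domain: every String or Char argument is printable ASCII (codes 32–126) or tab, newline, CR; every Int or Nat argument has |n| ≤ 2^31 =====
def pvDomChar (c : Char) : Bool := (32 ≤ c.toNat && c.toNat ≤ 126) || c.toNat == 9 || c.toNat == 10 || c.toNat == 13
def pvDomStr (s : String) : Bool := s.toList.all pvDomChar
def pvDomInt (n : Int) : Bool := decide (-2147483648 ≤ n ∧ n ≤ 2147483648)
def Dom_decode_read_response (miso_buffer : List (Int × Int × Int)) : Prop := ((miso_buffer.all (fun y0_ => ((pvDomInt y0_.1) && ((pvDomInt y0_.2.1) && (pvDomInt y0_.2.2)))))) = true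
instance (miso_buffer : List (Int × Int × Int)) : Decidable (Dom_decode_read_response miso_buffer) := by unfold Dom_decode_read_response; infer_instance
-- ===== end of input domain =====

-- B joins a two-digit uppercase hex per data byte in reversed order instead of
-- int.from_bytes + width-parameterised format; idiomatic alternative, same cost.

-- ===== PORT A =====
-- uppercase hex digit for 0 ≤ n < 16 (exact for '%X' formatting digits)
def pvHexDigitU (n : Nat) : Char := if n < 10 then Char.ofNat (48 + n) else Char.ofNat (55 + n)

-- uppercase hex digits (most significant first, no leading zeros) of n; exact for f"{n:X}", n ≥ 0
def pvToHexU (n : Nat) : List Char :=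
  if h : n < 16 then [pvHexDigitU n]
  else pvToHexU (n / 16) ++ [pvHexDigitU (n % 16)]
decreasing_by exact Nat.div_lt_self (by omega) (by omega)

-- int.from_bytes(bs, 'little'); exact when every byte is in range(0,256) (Pre_)
def pvFromBytesLE : List Int → Int
  | [] => 0
  | b :: t => b + 256 * pvFromBytesLE t

def decode_read_response (miso_buffer : List (Int × Int × Int)) : Option String :=
  let miso_bytes := miso_buffer.map (fun t => t.2.2)
  if miso_bytes.length ≤ 4 then none
  else
    let data_bytes := miso_bytes.drop 4
    if data_bytes = [] then none
    else
      let data_bytes := if data_bytes.length > 4 then data_bytes.take 4 else data_bytes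
      let value := pvFromBytesLE data_bytes
      -- f"0x{value:0{w}X}": zero-pad the hex digits of value to width w (exact for value ≥ 0, i.e. inside Pre_)
      let digits := pvToHexU value.toNat
      some (String.mk ('0' :: 'x' :: (List.replicate (data_bytes.length * 2 - digits.length) '0' ++ digits)))

-- ===== PORT B =====
-- f"{b:02X}" for 0 ≤ b < 256 (Pre_)
def pvByteHex (b : Int) : List Char := [pvHexDigitU (b.toNat / 16), pvHexDigitU (b.toNat % 16)]

def decode_read_response_alt (miso_buffer : List (Int × Int × Int)) : Option String :=
  let miso_bytes := miso_buffer.map (fun t => t.2.2)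
  if miso_bytes.length ≤ 4 then none
  else
    let data_bytes := (miso_bytes.drop 4).take 4   -- miso_bytes[4:8]
    some (String.mk ('0' :: 'x' :: data_bytes.reverse.flatMap pvByteHex))

-- ===== PRECONDITION & SPEC =====
-- Pre_ excludes exactly the inputs where int.from_bytes raises ValueError in A:
-- some data byte (position 4..7) outside range(0, 256).
def Pre_decode_read_response (miso_buffer : List (Int × Int × Int)) : Prop :=
  ∀ x ∈ (miso_buffer.drop 4).take 4, 0 ≤ x.2.2 ∧ x.2.2 < 256
instance (miso_buffer : List (Int × Int × Int)) : Decidable (Pre_decode_read_response miso_buffer) := by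
  unfold Pre_decode_read_response; infer_instance

def pvWitness_decode_read_response : (List (Int × Int × Int)) :=
  [(0,0,0),(0,0,0),(0,0,0),(0,0,0),(0,0,171)]

def Spec_decode_read_response (miso_buffer : List (Int × Int × Int)) (out : Option String) : Prop := out = decode_read_response_alt miso_buffer
instance (miso_buffer : List (Int × Int × Int)) (out : Option String) : Decidable (Spec_decode_read_response miso_buffer out) := by unfold Spec_decode_read_response; infer_instance

-- ===== CLAIM (what is proved, stated in full; the proofs are below) =====
def Claim_equal_decode_read_response : Prop := ∀ (miso_buffer : List (Int × Int × Int)), Dom_decode_read_response miso_buffer → Pre_decode_read_response miso_buffer → Spec_decode_read_response miso_buffer (decode_read_response miso_buffer)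

-- ===== LEMMAS AND PROOFS =====

-- fixed-width hex digits of v, msd first (proof-side characterisation)
def pvHexFixed : Nat → Nat → List Char
  | 0, _ => []
  | m + 1, v => pvHexFixed m (v / 16) ++ [pvHexDigitU (v % 16)]

theorem pvHexFixed_zero (m : Nat) : pvHexFixed m 0 = List.replicate m '0' := by
  induction m with
  | zero => rfl
  | succ m ih => simp [pvHexFixed, ih, List.replicate_succ', pvHexDigitU, Char.ofNat]

theorem pvToHexU_len {m v : Nat} (h : v < 16 ^ m) (hm : 1 ≤ m) : (pvToHexU v).length ≤ m := by
  induction m generalizing v with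
  | zero => omega
  | succ m ih =>
    rw [pvToHexU]
    split
    · simp
    · rename_i hv
      have h16 : v / 16 < 16 ^ m := by
        rw [Nat.div_lt_iff_lt_mul (by omega)]
        calc v < 16 ^ (m+1) := h
          _ = 16 ^ m * 16 := by ring
      have hm1 : 1 ≤ m := by
        by_contra hc
        have : m = 0 := by omega
        subst this; simp [pow_succ] at h; omega
      have := ih h16 hm1
      simp only [List.length_append, List.length_singleton]
      omega

theorem pad_toHexU_eq_hexFixed {m v : Nat} (h : v < 16 ^ m) (hm : 1 ≤ m) :
    List.replicate (m - (pvToHexU v).length) '0' ++ pvToHexU v = pvHexFixed m v := by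
  induction m generalizing v with
  | zero => omega
  | succ m ih =>
    rw [pvToHexU]
    split
    · rename_i hv
      simp only [List.length_singleton, pvHexFixed, Nat.div_eq_of_lt hv, Nat.mod_eq_of_lt hv,
        pvHexFixed_zero]
      simp
    · rename_i hv
      have h16 : v / 16 < 16 ^ m := by
        rw [Nat.div_lt_iff_lt_mul (by omega)]
        calc v < 16 ^ (m+1) := h
          _ = 16 ^ m * 16 := by ring
      have hm1 : 1 ≤ m := by
        by_contra hc
        have : m = 0 := by omega
        subst this; simp [pow_succ] at h; omega
      have hlen := pvToHexU_len h16 hm1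
      have := ih h16 hm1
      simp only [pvHexFixed, ← this, List.length_append, List.length_singleton]
      rw [show m + 1 - ((pvToHexU (v/16)).length + 1) = m - (pvToHexU (v/16)).length by omega]
      simp [List.append_assoc]

theorem pvFromBytesLE_bounds {d : List Int} (h : ∀ b ∈ d, 0 ≤ b ∧ b < 256) :
    0 ≤ pvFromBytesLE d ∧ (pvFromBytesLE d).toNat < 256 ^ d.length := by
  induction d with
  | nil => simp [pvFromBytesLE]
  | cons b t ih =>
    have hb := h b (by simp)
    have ht := ih (fun x hx => h x (List.mem_cons_of_mem _ hx))
    simp only [pvFromBytesLE, List.length_cons]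
    have hp : (256:Nat) ^ (t.length + 1) = 256 * 256 ^ t.length := by ring
    obtain ⟨h0, h1⟩ := ht
    constructor
    · omega
    · rw [hp]; omega

theorem hexFixed_fromLE {d : List Int} (h : ∀ b ∈ d, 0 ≤ b ∧ b < 256) :
    pvHexFixed (d.length * 2) (pvFromBytesLE d).toNat = d.reverse.flatMap pvByteHex := by
  induction d with
  | nil => simp [pvHexFixed]
  | cons b t ih =>
    have hb := h b (by simp)
    have ht := pvFromBytesLE_bounds (fun x hx => h x (List.mem_cons_of_mem _ hx))
    have hih := ih (fun x hx => h x (List.mem_cons_of_mem _ hx))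
    have hV : (pvFromBytesLE (b :: t)).toNat = b.toNat + 256 * (pvFromBytesLE t).toNat := by
      simp only [pvFromBytesLE]; omega
    have hlen : (b :: t).length * 2 = t.length * 2 + 1 + 1 := by simp; omega
    rw [hlen, pvHexFixed, pvHexFixed, hV]
    have hB : b.toNat < 256 := by omega
    have h1 : (b.toNat + 256 * (pvFromBytesLE t).toNat) % 16 = b.toNat % 16 := by omega
    have h2 : (b.toNat + 256 * (pvFromBytesLE t).toNat) / 16 / 16 = (pvFromBytesLE t).toNat := by omega
    have h3 : (b.toNat + 256 * (pvFromBytesLE t).toNat) / 16 % 16 = b.toNat / 16 := by omega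
    rw [h1, h2, h3, hih]
    simp [pvByteHex, List.append_assoc]

theorem main_eq {d : List Int} (hne : d ≠ []) (h : ∀ b ∈ d, 0 ≤ b ∧ b < 256) :
    List.replicate (d.length * 2 - (pvToHexU (pvFromBytesLE d).toNat).length) '0' ++
      pvToHexU (pvFromBytesLE d).toNat = d.reverse.flatMap pvByteHex := by
  have hb := pvFromBytesLE_bounds h
  have hlt : (pvFromBytesLE d).toNat < 16 ^ (d.length * 2) := by
    calc (pvFromBytesLE d).toNat < 256 ^ d.length := hb.2
      _ = 16 ^ (d.length * 2) := by rw [show (256:Nat) = 16^2 by norm_num, ← pow_mul, Nat.mul_comm]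
  have hm : 1 ≤ d.length * 2 := by
    rcases d with _ | ⟨b, t⟩
    · exact absurd rfl hne
    · have h1 : (b :: t).length = t.length + 1 := rfl
      omega
  rw [pad_toHexU_eq_hexFixed hlt hm, hexFixed_fromLE h]

-- ===== VERDICT (by name: the statement is the Claim_ definition above) =====
theorem decode_read_response_spec : Claim_equal_decode_read_response := by
  intro mb _ hpre
  unfold Spec_decode_read_response decode_read_response decode_read_response_alt
  simp only [List.length_map]
  by_cases hlen : mb.length ≤ 4
  · rw [if_pos hlen, if_pos hlen]
  · rw [if_neg hlen, if_neg hlen]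
    have hd : (mb.map (fun t => t.2.2)).drop 4 ≠ [] := by
      intro hc
      have := congrArg List.length hc
      simp at this
      omega
    rw [if_neg hd]
    set d0 : List Int := (mb.map (fun t => t.2.2)).drop 4 with hd0
    have hdrop : d0 = (mb.drop 4).map (fun t => t.2.2) := by simp [hd0, List.map_drop]
    have heq : (if d0.length > 4 then d0.take 4 else d0) = d0.take 4 := by
      split
      · rfl
      · rw [List.take_of_length_le (by omega)]
    rw [heq]
    have htake : d0.take 4 = ((mb.drop 4).take 4).map (fun t => t.2.2) := by
      rw [hdrop, List.map_take]
    have hbytes : ∀ b ∈ d0.take 4, 0 ≤ b ∧ b < 256 := by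
      intro b hbmem
      rw [htake] at hbmem
      obtain ⟨x, hx, rfl⟩ := List.mem_map.mp hbmem
      exact hpre x hx
    have hne4 : d0.take 4 ≠ [] := by
      intro hc
      have := congrArg List.length hc
      simp [hd0] at this
      omega
    rw [main_eq hne4 hbytes]
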